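-- pv_equiv track=rewrite | github.com/grogreta3/BEADAND-PROG1 | 42.py | nagy
-- ===== SOURCE A (Python) =====
-- li1=['a','b','c','d','e','f','g','h','i','j','k','l','m','n','o','p','q','r','s','t','u','v','w','x','y','z']
--
-- def nagy(szo):
--     elso =0
--     ut = 0
--     for i in range(len(li1)):
--         if szo[0]==li1[i]:
--             elso+=i+1
--         if szo[1]==li1[i]:
--             ut+=i+1
--     return abs(int(elso) - int(ut))
-- ===== SOURCE B (Python) =====
-- def nagy(szo):
--     def pos(c):
--         return ord(c) - 96 if 'a' <= c <= 'z' else 0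
--     return abs(pos(szo[0]) - pos(szo[1]))
-- ===== Notes on version B (the rewrite author's own statement) =====
-- stated objective: simpler
-- what changed: Replaces the 26-iteration scan over the alphabet list accumulating matched indices with a closed-form position helper ord(c)-96 guarded by 'a'<=c<='z', applied to the two characters directly.
import Mathlib
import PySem

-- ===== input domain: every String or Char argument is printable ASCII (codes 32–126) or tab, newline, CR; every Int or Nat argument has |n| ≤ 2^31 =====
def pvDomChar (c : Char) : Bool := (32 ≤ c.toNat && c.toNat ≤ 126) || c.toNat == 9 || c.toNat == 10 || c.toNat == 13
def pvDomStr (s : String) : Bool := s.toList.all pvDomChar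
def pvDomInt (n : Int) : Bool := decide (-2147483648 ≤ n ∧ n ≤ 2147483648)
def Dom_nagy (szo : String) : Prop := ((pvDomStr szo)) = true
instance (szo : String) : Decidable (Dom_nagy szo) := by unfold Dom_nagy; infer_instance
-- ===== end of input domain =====

-- B replaces A's scan over the alphabet list by a closed-form alphabet-position
-- helper computed from the character code (objective: simpler).

-- ===== PORT A =====
def li1 : List Char :=
  ['a','b','c','d','e','f','g','h','i','j','k','l','m','n','o','p','q','r','s','t','u','v','w','x','y','z']

def nagy (szo : String) : Int :=
  let p := (PySem.List.pyRange 0 (li1.length : Int) 1).foldl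
    (fun (p : Int × Int) i =>
      (if PySem.Str.pyGet? szo 0 = PySem.List.pyGet? li1 i then p.1 + (i + 1) else p.1,
       if PySem.Str.pyGet? szo 1 = PySem.List.pyGet? li1 i then p.2 + (i + 1) else p.2))
    (0, 0)
  |p.1 - p.2|

-- ===== PORT B =====
def posB (c : Char) : Int := if 'a' ≤ c ∧ c ≤ 'z' then (c.toNat : Int) - 96 else 0

def nagy_alt (szo : String) : Int :=
  match PySem.Str.pyGet? szo 0, PySem.Str.pyGet? szo 1 with
  | some a, some b => |posB a - posB b|
  | _, _ => 0   -- unreachable under Pre_nagy (Python raises IndexError)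

-- ===== PRECONDITION & SPEC =====
-- Pre_ excludes strings of fewer than two characters, on which Python's szo[1] raises IndexError.
def Pre_nagy (szo : String) : Prop := 2 ≤ szo.toList.length
instance (szo : String) : Decidable (Pre_nagy szo) := by unfold Pre_nagy; infer_instance
def pvWitness_nagy : String := "ab"

def Spec_nagy (szo : String) (out : Int) : Prop := out = nagy_alt szo
instance (szo : String) (out : Int) : Decidable (Spec_nagy szo out) := by unfold Spec_nagy; infer_instance

-- ===== CLAIM (what is proved, stated in full; the proofs are below) =====
def Claim_equal_nagy : Prop := ∀ (szo : String), Dom_nagy szo → Pre_nagy szo → Spec_nagy szo (nagy szo)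

-- ===== LEMMAS AND PROOFS =====

set_option maxRecDepth 4000 in
lemma range_mem_li1 (c : Char) (h1 : 'a' ≤ c) (h2 : c ≤ 'z') : c ∈ li1 := by
  have hlo : 97 ≤ c.toNat := h1
  have hhi : c.toNat ≤ 122 := h2
  have hofNat : Char.ofNat c.toNat = c := Char.ofNat_toNat c
  interval_cases hn : c.toNat <;> (rw [← hofNat]; decide)

-- the single-character loop sum equals the closed-form position
lemma fold_pos (c : Char) :
    (PySem.List.pyRange 0 (li1.length : Int) 1).foldl
      (fun (e : Int) i => if some c = PySem.List.pyGet? li1 i then e + (i + 1) else e) 0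
    = posB c := by
  by_cases hm : c ∈ li1
  · fin_cases hm <;> decide
  · have hstep : ∀ (e : Int), ∀ i ∈ PySem.List.pyRange 0 (li1.length : Int) 1,
        (if some c = PySem.List.pyGet? li1 i then e + (i + 1) else e) = e := by
      intro e i _
      rw [if_neg]
      intro hc
      exact hm (PySem.List.mem_of_pyGet?_eq_some li1 hc.symm)
    have hfold : (PySem.List.pyRange 0 (li1.length : Int) 1).foldl
        (fun (e : Int) i => if some c = PySem.List.pyGet? li1 i then e + (i + 1) else e) 0 = 0 := by
      generalize PySem.List.pyRange 0 (li1.length : Int) 1 = l at hstep ⊢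
      induction l with
      | nil => rfl
      | cons x xs ih =>
        simp only [List.foldl_cons, hstep 0 x (by simp)]
        exact ih (fun e i hi => hstep e i (by simp [hi]))
    rw [hfold, posB, if_neg]
    intro ⟨h1, h2⟩
    exact hm (range_mem_li1 c h1 h2)

lemma foldl_prod (l : List Int) (f g : Int → Int → Int) (a b : Int) :
    l.foldl (fun (p : Int × Int) i => (f p.1 i, g p.2 i)) (a, b) = (l.foldl f a, l.foldl g b) := by
  induction l generalizing a b with
  | nil => rfl
  | cons x xs ih => simpa using ih (f a x) (g b x)

-- ===== VERDICT (by name: the statement is the Claim_ definition above) =====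
theorem nagy_spec : Claim_equal_nagy := by
  intro szo _ hpre
  unfold Spec_nagy nagy nagy_alt
  obtain ⟨a, b, rest, hsz⟩ : ∃ a b rest, szo.toList = a :: b :: rest := by
    unfold Pre_nagy at hpre
    match h : szo.toList with
    | [] => rw [h] at hpre; simp at hpre
    | [x] => rw [h] at hpre; simp at hpre
    | x :: y :: r => exact ⟨x, y, r, rfl⟩
  have h0 : PySem.Str.pyGet? szo 0 = some a := by
    rw [show (0:Int) = ((0:Nat):Int) from rfl, PySem.Str.pyGet?_natCast, hsz]; rfl
  have h1 : PySem.Str.pyGet? szo 1 = some b := by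
    rw [show (1:Int) = ((1:Nat):Int) from rfl, PySem.Str.pyGet?_natCast, hsz]; rfl
  rw [h0, h1]
  simp only
  rw [foldl_prod (PySem.List.pyRange 0 (li1.length : Int) 1)
        (fun (e : Int) i => if some a = PySem.List.pyGet? li1 i then e + (i + 1) else e)
        (fun (e : Int) i => if some b = PySem.List.pyGet? li1 i then e + (i + 1) else e) 0 0]
  rw [fold_pos a, fold_pos b]
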